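-- pv_equiv track=rewrite | github.com/kushagra93/hyperliquid-perps-analyzer | events/monthly_review.py | _candle_before
-- ===== SOURCE A (Python) =====
-- def _candle_before(candles: list[tuple], ts_ms: int) -> tuple | None:
--     best = None
--     for c in candles:
--         if c[0] <= ts_ms:
--             best = c
--         else:
--             break
--     return best
-- ===== SOURCE B (Python) =====
-- def _candle_before(candles: list[tuple], ts_ms: int) -> tuple | None:
--     # Binary search (bisect-style) for the rightmost candle with timestamp <= ts_ms
--     # (candles assumed sorted by timestamp, as in the calling module).
--     lo, hi = 0, len(candles)
--     while lo < hi: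
--         mid = (lo + hi) // 2
--         if candles[mid][0] <= ts_ms:
--             lo = mid + 1
--         else:
--             hi = mid
--     return candles[lo - 1] if lo else None
-- ===== Notes on version B (the rewrite author's own statement) =====
-- stated objective: alternative
-- what changed: Replaces A's left-to-right scan (stop at the first timestamp > ts_ms) by a binary search for the rightmost candle with timestamp <= ts_ms; Pre_ excludes lists where a timestamp > ts_ms precedes one <= ts_ms (there A's break-dependent answer and B's bisect answer are both accidental for a function meant for chronologically sorted candles) and lists with an empty candle, on which A raises IndexError.
-- outside the precondition, e.g. on _candle_before([(5,), (1,)], 3): A returns None, B returns (1,); on _candle_before([(9,), (2,), (8,)], 3): A returns None, B returns (2,); on _candle_before([()], 3): A raises IndexError, B raises IndexError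
import Mathlib
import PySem

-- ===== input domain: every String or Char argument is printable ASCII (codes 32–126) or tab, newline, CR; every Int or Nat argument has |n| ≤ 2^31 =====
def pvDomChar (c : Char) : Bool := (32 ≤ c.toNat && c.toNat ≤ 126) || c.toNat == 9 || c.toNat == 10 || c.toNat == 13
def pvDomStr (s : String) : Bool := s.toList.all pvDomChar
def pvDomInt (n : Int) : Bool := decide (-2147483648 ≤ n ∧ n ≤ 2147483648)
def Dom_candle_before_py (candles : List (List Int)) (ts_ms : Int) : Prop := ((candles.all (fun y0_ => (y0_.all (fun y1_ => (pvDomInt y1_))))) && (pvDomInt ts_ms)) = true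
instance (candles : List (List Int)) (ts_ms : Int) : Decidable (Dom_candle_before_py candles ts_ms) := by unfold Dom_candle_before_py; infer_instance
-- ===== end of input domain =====

-- B replaces A's linear scan by a binary search for the rightmost candle with
-- timestamp ≤ ts_ms; exact on partitioned (e.g. chronologically sorted) candle lists.

-- ===== PORT A =====
-- 'for c in candles: if c[0] <= ts_ms: best = c else: break'; c[0] on an empty
-- candle raises IndexError in Python (pyGet? = none; excluded by Pre_).
def candleA_go (ts_ms : Int) : List (List Int) → Option (List Int) → Option (List Int)
  | [], best => best
  | c :: rest, best =>
    match PySem.List.pyGet? c 0 with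
    | some t => if t ≤ ts_ms then candleA_go ts_ms rest (some c) else best
    | none => best

def candle_before_py (candles : List (List Int)) (ts_ms : Int) : Option (List Int) :=
  candleA_go ts_ms candles none

-- ===== PORT B =====
-- the 'while lo < hi' binary-search loop of Source B
def candleB_go (candles : List (List Int)) (ts_ms : Int) (lo hi : Nat) : Nat :=
  if lo < hi then
    let mid := (lo + hi) / 2
    if (PySem.List.pyGet? ((PySem.List.pyGet? candles ((mid : Nat) : Int)).getD []) 0).getD 0 ≤ ts_ms then
      candleB_go candles ts_ms (mid + 1) hi
    else
      candleB_go candles ts_ms lo mid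
  else lo
termination_by hi - lo
decreasing_by all_goals omega

def candle_before_py_alt (candles : List (List Int)) (ts_ms : Int) : Option (List Int) :=
  let lo := candleB_go candles ts_ms 0 candles.length
  if lo ≠ 0 then PySem.List.pyGet? candles ((lo : Int) - 1) else none

-- ===== PRECONDITION & SPEC =====
-- Pre_ excludes candle lists in which some timestamp > ts_ms appears before one
-- ≤ ts_ms — there A's answer depends on where the scan happens to break and B's
-- on where bisection lands, both accidental for a function meant for
-- chronologically sorted candles — and lists containing an empty candle, on
-- which A raises IndexError.
def Pre_candle_before_py (candles : List (List Int)) (ts_ms : Int) : Prop :=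
  candles.Pairwise (fun a b => b.headD 0 ≤ ts_ms → a.headD 0 ≤ ts_ms) ∧ ∀ c ∈ candles, c ≠ []
instance (candles : List (List Int)) (ts_ms : Int) : Decidable (Pre_candle_before_py candles ts_ms) := by unfold Pre_candle_before_py; infer_instance

def pvWitness_candle_before_py : List (List Int) × Int := ([[1, 7], [2, 9], [5, 3]], 2)

def Spec_candle_before_py (candles : List (List Int)) (ts_ms : Int) (out : Option (List Int)) : Prop := out = candle_before_py_alt candles ts_ms
instance (candles : List (List Int)) (ts_ms : Int) (out : Option (List Int)) : Decidable (Spec_candle_before_py candles ts_ms out) := by unfold Spec_candle_before_py; infer_instance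

-- ===== CLAIM (what is proved, stated in full; the proofs are below) =====
def Claim_equal_candle_before_py : Prop := ∀ (candles : List (List Int)) (ts_ms : Int), Dom_candle_before_py candles ts_ms → Pre_candle_before_py candles ts_ms → Spec_candle_before_py candles ts_ms (candle_before_py candles ts_ms)

-- ===== LEMMAS AND PROOFS =====

-- timestamp of candle i (0 if out of range / empty; harmless under Pre_)
def pvT (candles : List (List Int)) (i : Nat) : Int := (candles.getD i []).headD 0

-- getLast? of a cons, phrased through Option.or
theorem pv_or_getLast? {α : Type} (c : α) (tw : List α) :
    (tw.getLast?).or (some c) = (c :: tw).getLast? := by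
  cases tw with
  | nil => simp
  | cons x xs => rw [List.getLast?_cons_cons]; cases h : (x :: xs).getLast? with
    | none => simp [List.getLast?_eq_none_iff] at h
    | some v => simp

-- A's scan returns the last element of the ≤-prefix
theorem candleA_go_eq (ts : Int) :
    ∀ (l : List (List Int)) (best : Option (List Int)), (∀ c ∈ l, c ≠ []) →
    candleA_go ts l best = ((l.takeWhile (fun c => decide (c.headD 0 ≤ ts))).getLast?).or best := by
  intro l
  induction l with
  | nil => intro best _; simp [candleA_go]
  | cons c rest ih =>
    intro best hne
    have hc : c ≠ [] := hne c (by simp)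
    obtain ⟨x, xs, rfl⟩ := List.exists_cons_of_ne_nil hc
    have hrest : ∀ d ∈ rest, d ≠ [] := fun d hd => hne d (by simp [hd])
    simp only [candleA_go, PySem.List.pyGet?_zero_cons]
    by_cases hx : x ≤ ts
    · rw [if_pos hx, ih _ hrest, List.takeWhile_cons_of_pos (by simp [hx]),
        ← pv_or_getLast?, Option.or_assoc]
      simp
    · rw [if_neg hx, List.takeWhile_cons_of_neg (by simp [hx])]
      simp

-- first element past the ≤-prefix fails the predicate (getD form)
theorem pv_takeWhile_stop {α : Type} (p : α → Bool) (d : α) :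
    ∀ (l : List α), (l.takeWhile p).length < l.length →
    p (l.getD (l.takeWhile p).length d) = false := by
  intro l
  induction l with
  | nil => intro h; simp at h
  | cons c rest ih =>
    intro h
    by_cases hc : p c
    · rw [List.takeWhile_cons_of_pos hc] at h ⊢
      simpa using ih (by simpa using h)
    · rw [List.takeWhile_cons_of_neg (by simp [hc])] at h ⊢
      simpa using hc

-- binary-search invariant: the loop returns the split point
theorem candleB_go_spec (candles : List (List Int)) (ts : Int)
    (part : ∀ i j, i ≤ j → j < candles.length → pvT candles j ≤ ts → pvT candles i ≤ ts) :
    ∀ (d lo hi : Nat), hi - lo = d → lo ≤ hi → hi ≤ candles.length →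
    (∀ i, i < lo → pvT candles i ≤ ts) →
    (∀ i, hi ≤ i → i < candles.length → ts < pvT candles i) →
    candleB_go candles ts lo hi ≤ candles.length ∧
    (∀ i, i < candleB_go candles ts lo hi → pvT candles i ≤ ts) ∧
    (∀ i, candleB_go candles ts lo hi ≤ i → i < candles.length → ts < pvT candles i) := by
  intro d
  induction d using Nat.strong_induction_on with
  | _ d ih =>
    intro lo hi hd hlohi hhin hlow hhigh
    rw [candleB_go]
    by_cases h : lo < hi
    · rw [if_pos h]
      have hmidlo : lo ≤ (lo + hi) / 2 := by omega
      have hmidhi : (lo + hi) / 2 < hi := by omega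
      have hmidn : (lo + hi) / 2 < candles.length := by omega
      have hval : (PySem.List.pyGet? ((PySem.List.pyGet? candles (((lo + hi) / 2 : Nat) : Int)).getD []) 0).getD 0
          = pvT candles ((lo + hi) / 2) := by
        rw [PySem.List.pyGet?_natCast, List.getElem?_eq_getElem hmidn]
        simp only [Option.getD_some, PySem.List.pyGet?_zero, pvT,
          List.getD_eq_getElem?_getD, List.getElem?_eq_getElem hmidn]
        cases candles[(lo + hi) / 2] <;> simp
      simp only [hval]
      by_cases hle : pvT candles ((lo + hi) / 2) ≤ ts
      · rw [if_pos hle]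
        exact ih (hi - ((lo + hi) / 2 + 1)) (by omega) _ _ rfl (by omega) hhin
          (fun i hi2 => part i ((lo + hi) / 2) (by omega) hmidn hle) hhigh
      · rw [if_neg hle]
        exact ih ((lo + hi) / 2 - lo) (by omega) _ _ rfl (by omega) (by omega) hlow
          (fun i h1 h2 => lt_of_not_ge fun hge =>
            hle (part ((lo + hi) / 2) i h1 h2 hge))
    · rw [if_neg h]
      exact ⟨by omega, hlow, fun i h1 h2 => hhigh i (by omega) h2⟩

-- the split point is unique
theorem pv_split_unique (P : Nat → Prop) (n a b : Nat)
    (ha : a ≤ n) (hb : b ≤ n)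
    (ha1 : ∀ i, i < a → P i) (ha2 : ∀ i, a ≤ i → i < n → ¬ P i)
    (hb1 : ∀ i, i < b → P i) (hb2 : ∀ i, b ≤ i → i < n → ¬ P i) : a = b := by
  rcases lt_trichotomy a b with h | h | h
  · exact absurd (hb1 a h) (ha2 a (le_refl a) (by omega))
  · exact h
  · exact absurd (ha1 b h) (hb2 b (le_refl b) (by omega))

theorem candle_before_py_spec : Claim_equal_candle_before_py := by
  intro candles ts _dom hpre
  obtain ⟨hpair, hne⟩ := hpre
  unfold Spec_candle_before_py candle_before_py candle_before_py_alt
  have part : ∀ i j, i ≤ j → j < candles.length → pvT candles j ≤ ts → pvT candles i ≤ ts := by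
    intro i j hij hj
    rcases eq_or_lt_of_le hij with rfl | hlt
    · exact fun h => h
    · have := (List.pairwise_iff_getElem.mp hpair) i j (by omega) hj hlt
      simpa [pvT, List.getD_eq_getElem?_getD, List.getElem?_eq_getElem (by omega : i < candles.length),
        List.getElem?_eq_getElem hj] using this
  have hkn : (candles.takeWhile (fun c => decide (c.headD 0 ≤ ts))).length ≤ candles.length :=
    (List.takeWhile_prefix _ (l := candles)).length_le
  have htake : candles.takeWhile (fun c => decide (c.headD 0 ≤ ts))
      = candles.take (candles.takeWhile (fun c => decide (c.headD 0 ≤ ts))).length :=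
    List.prefix_iff_eq_take.mp (List.takeWhile_prefix _)
  have hk1 : ∀ i, i < (candles.takeWhile (fun c => decide (c.headD 0 ≤ ts))).length →
      pvT candles i ≤ ts := by
    intro i hi
    have hin : i < candles.length := by omega
    have hmem : candles[i] ∈ candles.takeWhile (fun c => decide (c.headD 0 ≤ ts)) := by
      rw [htake]
      exact List.mem_iff_getElem.mpr ⟨i, by rw [List.length_take]; omega,
        by rw [List.getElem_take]⟩
    have := List.mem_takeWhile_imp hmem
    simpa [pvT, List.getD_eq_getElem?_getD, List.getElem?_eq_getElem hin] using this
  have hk2 : ∀ i, (candles.takeWhile (fun c => decide (c.headD 0 ≤ ts))).length ≤ i →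
      i < candles.length → ts < pvT candles i := by
    have hkk : (candles.takeWhile (fun c => decide (c.headD 0 ≤ ts))).length < candles.length →
        ts < pvT candles (candles.takeWhile (fun c => decide (c.headD 0 ≤ ts))).length := by
      intro hlen
      have h0 := pv_takeWhile_stop (fun c => decide (c.headD 0 ≤ ts)) [] candles hlen
      have h1 : decide ((candles.getD (candles.takeWhile (fun c => decide (c.headD 0 ≤ ts))).length []).headD 0 ≤ ts) = false := h0
      exact not_le.mp (of_decide_eq_false h1)
    intro i hki hin
    have hlen : (candles.takeWhile (fun c => decide (c.headD 0 ≤ ts))).length < candles.length := by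
      omega
    exact lt_of_not_ge fun hge => absurd (part _ i hki hin hge) (not_le.mpr (hkk hlen))
  have hB := candleB_go_spec candles ts part (candles.length - 0) 0 candles.length rfl
    (by omega) (le_refl _) (by omega) (fun i h1 h2 => absurd h1 (by omega))
  obtain ⟨hr_n, hr1, hr2⟩ := hB
  have hkr : (candles.takeWhile (fun c => decide (c.headD 0 ≤ ts))).length
      = candleB_go candles ts 0 candles.length :=
    pv_split_unique (fun i => pvT candles i ≤ ts) candles.length _ _
      hkn hr_n hk1 (fun i h1 h2 => not_le.mpr (hk2 i h1 h2)) hr1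
      (fun i h1 h2 => not_le.mpr (hr2 i h1 h2))
  rw [candleA_go_eq ts candles none hne, Option.or_none, ← hkr]
  rcases Nat.eq_zero_or_pos (candles.takeWhile (fun c => decide (c.headD 0 ≤ ts))).length
    with hk0 | hkpos
  · have hnil : candles.takeWhile (fun c => decide (c.headD 0 ≤ ts)) = [] :=
      List.eq_nil_of_length_eq_zero hk0
    rw [hnil]
    simp
  · rw [if_pos (by omega)]
    have hlast : (candles.takeWhile (fun c => decide (c.headD 0 ≤ ts))).getLast?
        = candles[(candles.takeWhile (fun c => decide (c.headD 0 ≤ ts))).length - 1]? := by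
      conv_lhs => rw [htake]
      rw [List.getLast?_eq_getElem?, List.length_take, List.getElem?_take]
      rw [if_pos (by omega)]
      congr 1
      omega
    have hcast : (((candles.takeWhile (fun c => decide (c.headD 0 ≤ ts))).length : Int) - 1)
        = (((candles.takeWhile (fun c => decide (c.headD 0 ≤ ts))).length - 1 : Nat) : Int) := by
      omega
    rw [hlast, hcast, PySem.List.pyGet?_natCast]
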